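-- pv_equiv track=rewrite | github.com/miliar/Code_Jam_Webscraper | solutions_python/solutions_year16_round1_nr1/1618.py | solve
-- ===== SOURCE A (Python) =====
-- def solve(cipher):
--     word = []
--     word.insert(0, cipher[0])
--     size = len(cipher)
--     for i in range(1, size):
--         if ord(cipher[i]) >= ord(word[0]):
--             word.insert(0, cipher[i])
--         else:
--             word.append(cipher[i])
--     return ''.join(word)
-- ===== SOURCE B (Python) =====
-- def solve(cipher):
--     # pass 1: prefix maxima table (raises IndexError on empty input, like A)
--     pm = []
--     m = cipher[0]
--     for c in cipher:
--         m = max(m, c)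
--         pm.append(m)
--     # pass 2: a char is a "record" iff it equals its prefix maximum;
--     # records go in front in reverse appearance order, the rest keep order
--     front = [c for c, p in zip(cipher, pm) if c == p]
--     back = [c for c, p in zip(cipher, pm) if c != p]
--     return ''.join(front[::-1]) + ''.join(back)
-- ===== Notes on version B (the rewrite author's own statement) =====
-- stated objective: faster
-- what changed: Replaces A's single greedy loop with insert(0)/append by two staged passes: build the prefix-maximum table, then partition characters by the record test c == pm[i] (records reversed in front, the rest in order), removing the O(n) front insertion.
import Mathlib
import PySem

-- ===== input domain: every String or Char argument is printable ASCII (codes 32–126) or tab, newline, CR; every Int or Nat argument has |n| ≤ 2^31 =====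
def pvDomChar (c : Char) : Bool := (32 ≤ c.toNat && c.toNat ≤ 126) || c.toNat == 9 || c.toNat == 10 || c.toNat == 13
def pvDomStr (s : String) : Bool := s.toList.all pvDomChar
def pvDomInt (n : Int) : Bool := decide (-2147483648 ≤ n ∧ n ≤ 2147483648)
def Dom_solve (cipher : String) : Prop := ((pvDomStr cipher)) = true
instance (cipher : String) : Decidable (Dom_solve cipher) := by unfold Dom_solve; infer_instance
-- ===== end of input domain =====

-- B replaces A's greedy insert(0)/append loop by two staged passes: a prefix-maximum
-- table, then a partition by the record test c == pm[i]; linear instead of quadratic worst case.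

-- ===== PORT A =====
-- A's loop: prepend if ord(cipher[i]) >= ord(word[0]), else append (word is never
-- empty inside the loop, so headD is exact for word[0]).
def solveLoopA (rest : List Char) (word : List Char) : List Char :=
  match rest with
  | [] => word
  | c :: rs =>
    if (word.headD c).toNat ≤ c.toNat then solveLoopA rs (c :: word)
    else solveLoopA rs (word ++ [c])

def solve (cipher : String) : String :=
  match cipher.toList with
  | [] => ""   -- unreachable under Pre_solve: Python raises IndexError on cipher[0]
  | c0 :: rest => String.mk (solveLoopA rest [c0])

-- ===== PORT B =====
-- pass 1 of Source B: the prefix-maximum table (max(m, c) keeps m on ties, like Python's max)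
def prefMax (cs : List Char) (m : Char) : List Char :=
  match cs with
  | [] => []
  | c :: rs =>
    let m' := if m.toNat < c.toNat then c else m
    m' :: prefMax rs m'

def solve_alt (cipher : String) : String :=
  match cipher.toList with
  | [] => ""   -- unreachable under Pre_solve: Python raises IndexError on cipher[0]
  | c0 :: _ =>
    let cs := cipher.toList
    let pm := prefMax cs c0
    let z := cs.zip pm
    let front := (z.filter (fun cp => cp.1 == cp.2)).map Prod.fst
    let back := (z.filter (fun cp => cp.1 != cp.2)).map Prod.fst
    String.mk (front.reverse ++ back)

-- ===== PRECONDITION & SPEC =====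
-- Pre_ excludes only the empty string, on which A raises IndexError at cipher[0].
def Pre_solve (cipher : String) : Prop := cipher ≠ ""
instance (cipher : String) : Decidable (Pre_solve cipher) := by unfold Pre_solve; infer_instance

def pvWitness_solve : String := "CAB"

def Spec_solve (cipher : String) (out : String) : Prop := out = solve_alt cipher
instance (cipher : String) (out : String) : Decidable (Spec_solve cipher out) := by unfold Spec_solve; infer_instance

-- ===== CLAIM (what is proved, stated in full; the proofs are below) =====
def Claim_equal_solve : Prop := ∀ (cipher : String), Dom_solve cipher → Pre_solve cipher → Spec_solve cipher (solve cipher)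

-- ===== LEMMAS AND PROOFS =====

-- Invariant: A's word is (records so far, reversed) ++ back; its head m is the running
-- maximum, which is also the seed of B's remaining prefix-maximum table.
theorem loop_equiv (rest : List Char) (m : Char) (fr bk : List Char) :
    solveLoopA rest (m :: fr ++ bk)
      = (((rest.zip (prefMax rest m)).filter (fun cp => cp.1 == cp.2)).map Prod.fst).reverse
        ++ (m :: fr) ++ bk
        ++ ((rest.zip (prefMax rest m)).filter (fun cp => cp.1 != cp.2)).map Prod.fst := by
  induction rest generalizing m fr bk with
  | nil => simp [solveLoopA, prefMax]
  | cons c rs ih =>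
    by_cases h : m.toNat ≤ c.toNat
    · -- record step: A prepends, B classifies c as a record (c equals the new max)
      have hm' : (if m.toNat < c.toNat then c else m) = c := by
        by_cases hlt : m.toNat < c.toNat
        · simp [hlt]
        · have hto : m.toNat = c.toNat := by omega
          have hmc : m = c := Char.ext (UInt32.toNat_inj.mp hto)
          simp [hmc]
      have hA : solveLoopA (c :: rs) (m :: fr ++ bk)
          = solveLoopA rs (c :: (m :: fr) ++ bk) := by
        simp [solveLoopA, h]
      rw [hA, ih c (m :: fr) bk]
      simp [prefMax, hm']
    · -- non-record step: A appends, B classifies c as non-record (c below the max)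
      have hne : (c == m) = false := by
        apply beq_eq_false_iff_ne.mpr
        intro hcm; apply h; simp [hcm]
      have hm' : (if m.toNat < c.toNat then c else m) = m := by
        have hlt : ¬ m.toNat < c.toNat := by omega
        simp [hlt]
      have hA : solveLoopA (c :: rs) (m :: fr ++ bk)
          = solveLoopA rs (m :: fr ++ (bk ++ [c])) := by
        simp [solveLoopA]
        omega
      rw [hA, ih m fr (bk ++ [c])]
      simp [prefMax, hm', hne, bne]

-- ===== VERDICT (by name: the statement is the Claim_ definition above) =====
theorem solve_spec : Claim_equal_solve := by
  intro cipher _ _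
  unfold Spec_solve solve solve_alt
  cases h : cipher.toList with
  | nil => rfl
  | cons c0 rest =>
    refine congrArg String.mk ?_
    have key := loop_equiv rest c0 [] []
    simp only [List.append_nil] at key
    rw [key]
    simp [prefMax, bne]
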